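-- pv_equiv track=rewrite | github.com/tymofij/advent-of-code-2020 | 11/seats.py | next_state_2
-- ===== SOURCE A (Python) =====
-- from copy import deepcopy
--
-- FLOOR = '.'
--
-- EMPTY = 'L'
--
-- TAKEN = '#'
--
-- def count_visible(seats, i, j):
--     res = 0
--     directions = [
--         (-1, -1), (-1, 0), (-1, 1),
--         (0,  -1),          (0,  1),
--         (1,  -1), (1,  0), (1 , 1)
--     ]
--     for (di, dj) in directions:
--         ni, nj = i+di, j+dj
--         while ((0 <= ni <= len(seats)-1) and
--                (0 <= nj <= len(seats[0])-1)):
--             if seats[ni][nj] == EMPTY: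
--                 break
--             if seats[ni][nj] == TAKEN:
--                 res += 1
--                 break
--             ni, nj = ni+di, nj+dj
--     return res
--
-- def next_state_2(seats):
--     new = deepcopy(seats)
--     for i in range(len(seats)):
--         for j in range(len(seats[0])):
--             if seats[i][j] == FLOOR:
--                 continue
--             neighbours = count_visible(seats, i, j)
--             if seats[i][j] == EMPTY and neighbours == 0:
--                 new[i][j] = TAKEN
--             if seats[i][j] == TAKEN and neighbours >= 5:
--                 new[i][j] = EMPTY
--     return new
-- ===== SOURCE B (Python) =====
-- FLOOR = '.'
--
-- EMPTY = 'L'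
--
-- TAKEN = '#'
--
-- def next_state_2(seats):
--     # 8 directional DP sweeps: for each direction, compute for every cell whether the
--     # nearest visible seat in that direction is taken, in dependency order, so each
--     # cell costs O(1); then decide each cell from the 8 per-direction tables.
--     h = len(seats)
--     if h == 0:
--         return []
--     w = len(seats[0])
--     tables = []
--     for di, dj in ((-1, -1), (-1, 0), (-1, 1), (0, -1), (0, 1), (1, -1), (1, 0), (1, 1)):
--         vis = {}
--         for i in (range(h) if di <= 0 else range(h - 1, -1, -1)):
--             for j in (range(w) if dj <= 0 else range(w - 1, -1, -1)):
--                 pi, pj = i + di, j + dj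
--                 if 0 <= pi < h and 0 <= pj < w:
--                     c = seats[pi][pj]
--                     if c == TAKEN:
--                         v = True
--                     elif c == EMPTY:
--                         v = False
--                     else:
--                         v = vis[(pi, pj)]
--                 else:
--                     v = False
--                 vis[(i, j)] = v
--         tables.append(vis)
--     new = []
--     for i in range(h):
--         row = list(seats[i])
--         for j in range(w):
--             c = row[j]
--             if c == FLOOR:
--                 continue
--             n = sum(1 for vis in tables if vis[(i, j)])
--             if c == EMPTY and n == 0:
--                 row[j] = TAKEN
--             elif c == TAKEN and n >= 5:
--                 row[j] = EMPTY
--         new.append(row)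
--     return new
-- ===== Notes on version B (the rewrite author's own statement) =====
-- stated objective: alternative
-- what changed: A walks a ray outward per cell and direction until it meets a seat; B instead runs 8 directional DP sweeps that build, per direction and in dependency order, a table of 'nearest visible seat in that direction is taken' with O(1) work per cell, then decides every cell from the 8 tables.
import Mathlib
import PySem

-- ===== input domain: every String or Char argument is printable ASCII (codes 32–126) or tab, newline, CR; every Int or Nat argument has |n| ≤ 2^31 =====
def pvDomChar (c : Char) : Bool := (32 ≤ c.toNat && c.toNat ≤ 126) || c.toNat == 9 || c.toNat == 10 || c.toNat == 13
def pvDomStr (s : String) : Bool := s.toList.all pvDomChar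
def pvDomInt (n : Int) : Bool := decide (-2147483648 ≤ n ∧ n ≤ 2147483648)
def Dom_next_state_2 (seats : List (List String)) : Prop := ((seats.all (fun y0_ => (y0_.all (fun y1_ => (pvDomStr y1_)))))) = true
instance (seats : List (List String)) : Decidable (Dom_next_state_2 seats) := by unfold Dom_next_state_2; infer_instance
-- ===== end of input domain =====

-- B replaces A's per-cell outward ray walks by 8 directional DP sweeps that compute the
-- nearest visible seat of every cell in dependency order (an alternative algorithm).

-- ===== PORT A =====
-- seats[i][j]: indices here are only used where A's guards hold, so the defaults are unreachable
def pvCell (seats : List (List String)) (i j : Int) : String :=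
  (PySem.List.pyGet? ((PySem.List.pyGet? seats i).getD []) j).getD ""

-- A's guard: 0 <= ni <= len(seats)-1 and 0 <= nj <= len(seats[0])-1
def pvInR (h w ni nj : Int) : Bool :=
  decide (0 ≤ ni) && decide (ni ≤ h - 1) && decide (0 ≤ nj) && decide (nj ≤ w - 1)

def pvDirs : List (Int × Int) :=
  [(-1, -1), (-1, 0), (-1, 1), (0, -1), (0, 1), (1, -1), (1, 0), (1, 1)]

-- the while loop of count_visible; fuel h+w+2 bounds its iteration count (the walk
-- leaves the h×w box after at most that many unit steps)
def pvVisLoop (seats : List (List String)) (h w di dj : Int) : Nat → Int → Int → Int → Int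
  | 0, _, _, res => res
  | Nat.succ f, ni, nj, res =>
    if pvInR h w ni nj then
      if pvCell seats ni nj = "L" then res
      else if pvCell seats ni nj = "#" then res + 1
      else pvVisLoop seats h w di dj f (ni + di) (nj + dj) res
    else res

def pvCountVisible (seats : List (List String)) (i j : Int) : Int :=
  pvDirs.foldl
    (fun res d =>
      pvVisLoop seats (seats.length : Int) ((seats.headD []).length : Int) d.1 d.2
        (seats.length + (seats.headD []).length + 2) (i + d.1) (j + d.2) res)
    0

-- new[i][j] = v  (i, j are loop indices with 0 ≤ i < len(new), 0 ≤ j, so .toNat is exact)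
def pvSetCell (g : List (List String)) (i j : Int) (v : String) : List (List String) :=
  g.set i.toNat ((g.getD i.toNat []).set j.toNat v)

def next_state_2 (seats : List (List String)) : List (List String) :=
  (PySem.List.pyRange 0 (seats.length : Int)).foldl
    (fun new i =>
      (PySem.List.pyRange 0 ((seats.headD []).length : Int)).foldl
        (fun new j =>
          if pvCell seats i j = "." then new
          else
            let neighbours := pvCountVisible seats i j
            let new' := if pvCell seats i j = "L" ∧ neighbours = 0 then pvSetCell new i j "#" else new
            if pvCell seats i j = "#" ∧ neighbours ≥ 5 then pvSetCell new' i j "L" else new')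
        new)
    seats

-- ===== PORT B =====
-- B's guard: 0 <= pi < h and 0 <= pj < w
def pvInR2 (h w i j : Int) : Bool :=
  decide (0 ≤ i) && decide (i < h) && decide (0 ≤ j) && decide (j < w)

-- body of B's innermost loop: vis[(i, j)] = v  (the vis[(pi, pj)] lookup's default is
-- unreachable: the sweep order guarantees the key is present)
def pvInnerF (seats : List (List String)) (h w di dj i : Int)
    (vis : PySem.Dict (Int × Int) Bool) (j : Int) : PySem.Dict (Int × Int) Bool :=
  vis.insert (i, j)
    (if pvInR2 h w (i + di) (j + dj) then
      (if pvCell seats (i + di) (j + dj) = "#" then true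
       else if pvCell seats (i + di) (j + dj) = "L" then false
       else (vis.get? (i + di, j + dj)).getD false)
     else false)

def pvBuildVis (seats : List (List String)) (h w di dj : Int) : PySem.Dict (Int × Int) Bool :=
  (if di ≤ 0 then PySem.List.pyRange 0 h else PySem.List.pyRange (h - 1) (-1) (-1)).foldl
    (fun vis i =>
      (if dj ≤ 0 then PySem.List.pyRange 0 w else PySem.List.pyRange (w - 1) (-1) (-1)).foldl
        (pvInnerF seats h w di dj i) vis)
    PySem.Dict.empty

-- n = sum(1 for vis in tables if vis[(i, j)])
def pvCountB (tables : List (PySem.Dict (Int × Int) Bool)) (i j : Int) : Int :=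
  (tables.map (fun vis => if (vis.get? (i, j)).getD false then (1 : Int) else 0)).sum

def next_state_2_alt (seats : List (List String)) : List (List String) :=
  let h : Int := (seats.length : Int)
  if h = 0 then []
  else
    let w : Int := ((seats.headD []).length : Int)
    let tables := pvDirs.foldl (fun ts d => ts ++ [pvBuildVis seats h w d.1 d.2]) []
    (PySem.List.pyRange 0 h).foldl
      (fun new i =>
        let row := (PySem.List.pyGet? seats i).getD []
        let row' := (PySem.List.pyRange 0 w).foldl
          (fun row j =>
            let c := (PySem.List.pyGet? row j).getD ""
            if c = "." then row
            else
              let n := pvCountB tables i j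
              if c = "L" ∧ n = 0 then row.set j.toNat "#"
              else if c = "#" ∧ n ≥ 5 then row.set j.toNat "L"
              else row)
          row
        new ++ [row'])
      []

-- ===== PRECONDITION & SPEC =====
-- Pre_ excludes ragged grids in which some row is shorter than the first row: there A
-- raises IndexError while reading a cell (and B raises as well).
def Pre_next_state_2 (seats : List (List String)) : Prop :=
  ∀ row ∈ seats, (seats.headD []).length ≤ row.length
instance (seats : List (List String)) : Decidable (Pre_next_state_2 seats) := by
  unfold Pre_next_state_2; infer_instance

def pvWitness_next_state_2 : List (List String) := [["L", "."], [".", "#"]]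

def Spec_next_state_2 (seats : List (List String)) (out : List (List String)) : Prop := out = next_state_2_alt seats
instance (seats : List (List String)) (out : List (List String)) : Decidable (Spec_next_state_2 seats out) := by unfold Spec_next_state_2; infer_instance

-- ===== CLAIM (what is proved, stated in full; the proofs are below) =====
def Claim_equal_next_state_2 : Prop := ∀ (seats : List (List String)), Dom_next_state_2 seats → Pre_next_state_2 seats → Spec_next_state_2 seats (next_state_2 seats)

-- ===== LEMMAS AND PROOFS =====

-- the common specification: pvSeen … f i j = "walking from cell (i,j) in direction
-- (di,dj), the first seat reached inside the h×w box is taken" (fuel f)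
def pvSeen (seats : List (List String)) (h w di dj : Int) : Nat → Int → Int → Bool
  | 0, _, _ => false
  | Nat.succ f, i, j =>
    if pvInR2 h w i j then
      if pvCell seats i j = "L" then false
      else if pvCell seats i j = "#" then true
      else pvSeen seats h w di dj f (i + di) (j + dj)
    else false

-- number of steps after which the walk starting at (i,j) has left the box
def pvSB (h w di dj i j : Int) : Nat :=
  if di = 1 then (h - i).toNat
  else if di = -1 then (i + 1).toNat
  else if dj = 1 then (w - j).toNat
  else (j + 1).toNat

def pvDirOK (di dj : Int) : Prop :=
  (di = -1 ∨ di = 0 ∨ di = 1) ∧ (dj = -1 ∨ dj = 0 ∨ dj = 1) ∧ ¬(di = 0 ∧ dj = 0)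

theorem pvDirOK_of_mem {d : Int × Int} (hd : d ∈ pvDirs) : pvDirOK d.1 d.2 := by
  fin_cases hd <;> simp [pvDirOK]

theorem pvInR_eq (h w i j : Int) : pvInR h w i j = pvInR2 h w i j := by
  simp [pvInR, pvInR2]

theorem pvSB_zero {h w di dj i j : Int} (hd : pvDirOK di dj)
    (h0 : pvSB h w di dj i j = 0) : pvInR2 h w i j = false := by
  obtain ⟨h1, h2, h3⟩ := hd
  rw [Bool.eq_false_iff]
  intro hin
  simp only [pvInR2, Bool.and_eq_true, decide_eq_true_eq] at hin
  simp only [pvSB] at h0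
  rcases h1 with rfl | rfl | rfl <;> rcases h2 with rfl | rfl | rfl <;>
    first
      | exact absurd ⟨rfl, rfl⟩ h3
      | (norm_num at h0; omega)

theorem pvSB_dec {h w di dj i j : Int} (hd : pvDirOK di dj)
    (hin : pvInR2 h w i j = true) : pvSB h w di dj (i + di) (j + dj) < pvSB h w di dj i j := by
  obtain ⟨h1, h2, h3⟩ := hd
  simp only [pvInR2, Bool.and_eq_true, decide_eq_true_eq] at hin
  simp only [pvSB]
  rcases h1 with rfl | rfl | rfl <;> rcases h2 with rfl | rfl | rfl <;>
    first
      | exact absurd ⟨rfl, rfl⟩ h3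
      | (norm_num; omega)

theorem pvSeen_stab (seats : List (List String)) {h w di dj : Int} (hd : pvDirOK di dj) :
    ∀ (s f g : Nat) (i j : Int), pvSB h w di dj i j ≤ s → pvSB h w di dj i j ≤ f →
      pvSB h w di dj i j ≤ g → pvSeen seats h w di dj f i j = pvSeen seats h w di dj g i j := by
  intro s
  induction s with
  | zero =>
    intro f g i j hs hf hg
    have hR : pvInR2 h w i j = false := pvSB_zero hd (Nat.le_zero.mp hs)
    have hfalse : ∀ k, pvSeen seats h w di dj k i j = false := by
      intro k; cases k with
      | zero => rfl
      | succ k => simp [pvSeen, hR]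
    rw [hfalse, hfalse]
  | succ s ih =>
    intro f g i j hs hf hg
    by_cases h0 : pvSB h w di dj i j = 0
    · have hR : pvInR2 h w i j = false := pvSB_zero hd h0
      have hfalse : ∀ k, pvSeen seats h w di dj k i j = false := by
        intro k; cases k with
        | zero => rfl
        | succ k => simp [pvSeen, hR]
      rw [hfalse, hfalse]
    · obtain ⟨f', rfl⟩ : ∃ f', f = f' + 1 := ⟨f - 1, by omega⟩
      obtain ⟨g', rfl⟩ : ∃ g', g = g' + 1 := ⟨g - 1, by omega⟩
      simp only [pvSeen]
      cases hR : pvInR2 h w i j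
      · rfl
      · have hdec := pvSB_dec hd hR
        by_cases hc : pvCell seats i j = "L"
        · simp [hc]
        · by_cases hc2 : pvCell seats i j = "#"
          · simp [hc2]
          · simp only [hc, hc2, if_false]
            exact ih f' g' (i + di) (j + dj) (by omega) (by omega) (by omega)

-- canonical form: the fuel is exactly the step bound
def pvSEEN (seats : List (List String)) (h w di dj i j : Int) : Bool :=
  pvSeen seats h w di dj (pvSB h w di dj i j) i j

theorem pvSeen_eq_SEEN (seats : List (List String)) {h w di dj : Int} (hd : pvDirOK di dj)
    {f : Nat} {i j : Int} (hf : pvSB h w di dj i j ≤ f) :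
    pvSeen seats h w di dj f i j = pvSEEN seats h w di dj i j := by
  exact pvSeen_stab seats hd f f (pvSB h w di dj i j) i j hf hf le_rfl

theorem pvSEEN_rec (seats : List (List String)) {h w di dj : Int} (hd : pvDirOK di dj) (i j : Int) :
    pvSEEN seats h w di dj i j =
      (if pvInR2 h w i j then
        (if pvCell seats i j = "#" then true
         else if pvCell seats i j = "L" then false
         else pvSEEN seats h w di dj (i + di) (j + dj))
       else false) := by
  unfold pvSEEN
  cases hR : pvInR2 h w i j
  · have hfalse : ∀ k, pvSeen seats h w di dj k i j = false := by
      intro k; cases k with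
      | zero => rfl
      | succ k => simp [pvSeen, hR]
    rw [hfalse]
    simp
  · have hdec := pvSB_dec hd hR
    obtain ⟨n, hn⟩ : ∃ n, pvSB h w di dj i j = n + 1 := ⟨pvSB h w di dj i j - 1, by omega⟩
    rw [hn]
    simp only [pvSeen, hR, if_true]
    by_cases hc : pvCell seats i j = "L"
    · have hc2 : ¬ pvCell seats i j = "#" := by rw [hc]; decide
      simp [hc]
    · by_cases hc2 : pvCell seats i j = "#"
      · simp [hc2]
      · simp only [hc, hc2, if_false]
        exact pvSeen_eq_SEEN seats hd (by omega)

-- ===== the DP sweep produces pvSEEN at every cell =====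

def pvGood (seats : List (List String)) (h w di dj : Int)
    (D : PySem.Dict (Int × Int) Bool) (S : Int × Int → Prop) : Prop :=
  ∀ a b : Int, S (a, b) → D.get? (a, b) = some (pvSEEN seats h w di dj (a + di) (b + dj))

-- the order condition the inner sweep needs: each cell's predecessor is available
def pvColsOK (h w di dj i : Int) : List Int → (Int × Int → Prop) → Prop
  | [], _ => True
  | c :: rest, S =>
      (pvInR2 h w (i + di) (c + dj) = true → S (i + di, c + dj)) ∧
      pvColsOK h w di dj i rest (fun p => S p ∨ p = (i, c))

theorem pvColsOK_mono {h w di dj i : Int} :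
    ∀ (cols : List Int) (S S' : Int × Int → Prop), (∀ p, S p → S' p) →
      pvColsOK h w di dj i cols S → pvColsOK h w di dj i cols S' := by
  intro cols
  induction cols with
  | nil => intro S S' _ _; trivial
  | cons c rest ih =>
    intro S S' hss hc
    exact ⟨fun hin => hss _ (hc.1 hin),
      ih _ _ (fun p hp => hp.elim (fun h' => Or.inl (hss p h')) Or.inr) hc.2⟩

theorem pvColsOK_of_forall {h w di dj i : Int} (cols : List Int) (S : Int × Int → Prop)
    (H : ∀ c ∈ cols, pvInR2 h w (i + di) (c + dj) = true → S (i + di, c + dj)) :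
    pvColsOK h w di dj i cols S := by
  induction cols generalizing S with
  | nil => trivial
  | cons c rest ih =>
    exact ⟨fun hin => H c List.mem_cons_self hin,
      pvColsOK_mono rest S _ (fun p hp => Or.inl hp)
        (ih S (fun a ha hin => H a (List.mem_cons_of_mem c ha) hin))⟩


theorem pvInner (seats : List (List String)) {h w di dj : Int} (hd : pvDirOK di dj) (i : Int) :
    ∀ (cols : List Int) (D : PySem.Dict (Int × Int) Bool) (S : Int × Int → Prop),
      pvGood seats h w di dj D S → pvColsOK h w di dj i cols S →
      pvGood seats h w di dj (cols.foldl (pvInnerF seats h w di dj i) D)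
        (fun p => S p ∨ (p.1 = i ∧ p.2 ∈ cols)) := by
  intro cols
  induction cols with
  | nil =>
    intro D S hG hC a b hab
    exact hG a b (by simpa using hab)
  | cons c rest ih =>
    intro D S hG hC
    have hv : (if pvInR2 h w (i + di) (c + dj) then
          (if pvCell seats (i + di) (c + dj) = "#" then true
           else if pvCell seats (i + di) (c + dj) = "L" then false
           else (D.get? (i + di, c + dj)).getD false)
         else false) = pvSEEN seats h w di dj (i + di) (c + dj) := by
      rw [pvSEEN_rec seats hd (i + di) (c + dj)]
      cases hR : pvInR2 h w (i + di) (c + dj)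
      · rfl
      · simp only [if_true]
        by_cases hc1 : pvCell seats (i + di) (c + dj) = "#"
        · simp [hc1]
        · by_cases hc2 : pvCell seats (i + di) (c + dj) = "L"
          · simp [hc2]
          · simp only [hc1, hc2, if_false]
            rw [hG (i + di) (c + dj) (hC.1 hR)]
            rfl
    have hstep : pvGood seats h w di dj (pvInnerF seats h w di dj i D c)
        (fun p => S p ∨ p = (i, c)) := by
      intro a b hab
      simp only [pvInnerF]
      by_cases hpc : ((a, b) : Int × Int) = (i, c)
      · obtain ⟨rfl, rfl⟩ := Prod.mk.inj hpc
        rw [PySem.Dict.get?_insert_self, hv]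
      · rw [PySem.Dict.get?_insert_of_ne _ _ hpc]
        rcases hab with hab | hab
        · exact hG a b hab
        · exact absurd hab hpc
    have hrest := ih (pvInnerF seats h w di dj i D c) (fun p => S p ∨ p = (i, c)) hstep hC.2
    intro a b hab
    apply hrest a b
    rcases hab with hab | ⟨ha, hb⟩
    · exact Or.inl (Or.inl hab)
    · rcases List.mem_cons.mp hb with rfl | hb
      · exact Or.inl (Or.inr (Prod.ext ha rfl))
      · exact Or.inr ⟨ha, hb⟩


theorem pvRange_one_nil {a b : Int} (h : b ≤ a) : PySem.List.pyRange a b = [] := by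
  unfold PySem.List.pyRange; simp; omega

theorem pvRange_neg_nil {a : Int} (h : a ≤ -1) : PySem.List.pyRange a (-1) (-1) = [] := by
  unfold PySem.List.pyRange; simp; omega

theorem pvRange_neg_cons {a : Int} (h : -1 < a) :
    PySem.List.pyRange a (-1) (-1) = a :: PySem.List.pyRange (a - 1) (-1) (-1) := by
  unfold PySem.List.pyRange
  simp only [Int.reduceNeg, neg_eq_zero, one_ne_zero, ↓reduceIte, neg_mul, one_mul, Int.neg_pos,
    Int.reduceLT, sub_neg_eq_add, neg_neg, add_sub_cancel_right, EuclideanDomain.div_one,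
    neg_lt_sub_iff_lt_add, lt_add_iff_pos_right, sub_add_cancel]
  rw [if_pos h, show (a + 1).toNat = a.toNat + 1 from by omega, List.range_succ_eq_map]
  by_cases h0 : 0 < a
  · rw [if_pos h0]
    simp only [List.map_cons, Nat.cast_zero, add_zero, neg_zero, List.map_map, List.cons.injEq,
      true_and]
    apply List.map_congr_left
    intro k _
    simp [Function.comp]
    ring
  · rw [if_neg h0]
    have : a = 0 := by omega
    subst this
    simp

theorem pvMem_range_desc : ∀ (n : Nat) (a x : Int), (a + 1).toNat ≤ n →
    (x ∈ PySem.List.pyRange a (-1) (-1) ↔ 0 ≤ x ∧ x ≤ a) := by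
  intro n
  induction n with
  | zero =>
    intro a x hn
    rw [pvRange_neg_nil (by omega)]
    simp; omega
  | succ n ih =>
    intro a x hn
    by_cases ha : -1 < a
    · rw [pvRange_neg_cons ha, List.mem_cons, ih (a - 1) x (by omega)]
      constructor
      · rintro (rfl | ⟨h1, h2⟩) <;> omega
      · intro hx
        by_cases hxa : x = a
        · exact Or.inl hxa
        · exact Or.inr ⟨hx.1, by omega⟩
    · rw [pvRange_neg_nil (by omega)]
      simp; omega

-- chain conditions for the two horizontal sweeps
theorem pvColsOK_asc {h w i : Int} : ∀ (n : Nat) (a : Int) (S : Int × Int → Prop),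
    (w - a).toNat ≤ n → (∀ b, 0 ≤ b → b < a → S (i, b)) →
    pvColsOK h w 0 (-1) i (PySem.List.pyRange a w) S := by
  intro n
  induction n with
  | zero =>
    intro a S hn hS
    rw [pvRange_one_nil (by omega)]; trivial
  | succ n ih =>
    intro a S hn hS
    by_cases haw : a < w
    · rw [PySem.List.pyRange_one_cons haw]
      refine ⟨?_, ?_⟩
      · intro hin
        simp only [pvInR2, Bool.and_eq_true, decide_eq_true_eq] at hin
        have := hS (a + -1) (by omega) (by omega)
        simpa using this
      · apply ih (a + 1) _ (by omega)
        intro b hb hb'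
        by_cases hba : b < a
        · exact Or.inl (hS b hb hba)
        · have : b = a := by omega
          subst this; exact Or.inr rfl
    · rw [pvRange_one_nil (by omega)]; trivial

theorem pvColsOK_desc {h w i : Int} : ∀ (n : Nat) (a : Int) (S : Int × Int → Prop),
    (a + 1).toNat ≤ n → (∀ b, a < b → b < w → S (i, b)) →
    pvColsOK h w 0 1 i (PySem.List.pyRange a (-1) (-1)) S := by
  intro n
  induction n with
  | zero =>
    intro a S hn hS
    rw [pvRange_neg_nil (by omega)]; trivial
  | succ n ih =>
    intro a S hn hS
    by_cases ha : -1 < a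
    · rw [pvRange_neg_cons ha]
      refine ⟨?_, ?_⟩
      · intro hin
        simp only [pvInR2, Bool.and_eq_true, decide_eq_true_eq] at hin
        have := hS (a + 1) (by omega) (by omega)
        simpa using this
      · apply ih (a - 1) _ (by omega)
        intro b hb hb'
        by_cases hba : a < b
        · exact Or.inl (hS b hba hb')
        · have : b = a := by omega
          subst this; exact Or.inr rfl
    · rw [pvRange_neg_nil (by omega)]; trivial

def pvRowsOK (h di : Int) : List Int → (Int → Prop) → Prop
  | [], _ => True
  | i :: rest, P =>
      (di ≠ 0 → 0 ≤ i + di → i + di < h → P (i + di)) ∧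
      pvRowsOK h di rest (fun a => P a ∨ a = i)


theorem pvRowsOK_asc {h di : Int} (hdi : di = -1 ∨ di = 0) : ∀ (n : Nat) (a : Int) (P : Int → Prop),
    (h - a).toNat ≤ n → (∀ b, 0 ≤ b → b < a → P b) → pvRowsOK h di (PySem.List.pyRange a h) P := by
  intro n
  induction n with
  | zero =>
    intro a P hn hP
    rw [pvRange_one_nil (by omega)]; trivial
  | succ n ih =>
    intro a P hn hP
    by_cases hah : a < h
    · rw [PySem.List.pyRange_one_cons hah]
      refine ⟨?_, ?_⟩
      · intro hne h1 h2
        rcases hdi with rfl | rfl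
        · exact hP (a + -1) (by omega) (by omega)
        · exact absurd rfl hne
      · apply ih (a + 1) _ (by omega)
        intro b hb hb'
        by_cases hba : b < a
        · exact Or.inl (hP b hb hba)
        · have : b = a := by omega
          subst this; exact Or.inr rfl
    · rw [pvRange_one_nil (by omega)]; trivial

theorem pvRowsOK_desc {h : Int} : ∀ (n : Nat) (a : Int) (P : Int → Prop),
    (a + 1).toNat ≤ n → (∀ b, a < b → b < h → P b) → pvRowsOK h 1 (PySem.List.pyRange a (-1) (-1)) P := by
  intro n
  induction n with
  | zero =>
    intro a P hn hP
    rw [pvRange_neg_nil (by omega)]; trivial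
  | succ n ih =>
    intro a P hn hP
    by_cases ha : -1 < a
    · rw [pvRange_neg_cons ha]
      refine ⟨?_, ?_⟩
      · intro _ h1 h2
        exact hP (a + 1) (by omega) h2
      · apply ih (a - 1) _ (by omega)
        intro b hb hb'
        by_cases hba : a < b
        · exact Or.inl (hP b hba hb')
        · have : b = a := by omega
          subst this; exact Or.inr rfl
    · rw [pvRange_neg_nil (by omega)]; trivial

theorem pvOuter (seats : List (List String)) {h w di dj : Int} (hd : pvDirOK di dj)
    (cols : List Int) (hmem : ∀ b : Int, 0 ≤ b → b < w → b ∈ cols)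
    (hchain : ∀ (i : Int) (S : Int × Int → Prop),
      (di ≠ 0 → ∀ c ∈ cols, pvInR2 h w (i + di) (c + dj) = true → S (i + di, c + dj)) →
      pvColsOK h w di dj i cols S) :
    ∀ (rows : List Int) (D : PySem.Dict (Int × Int) Bool) (P : Int → Prop),
      pvGood seats h w di dj D (fun p => P p.1 ∧ p.2 ∈ cols) →
      pvRowsOK h di rows P →
      pvGood seats h w di dj
        (rows.foldl (fun vis i => cols.foldl (pvInnerF seats h w di dj i) vis) D)
        (fun p => (P p.1 ∨ p.1 ∈ rows) ∧ p.2 ∈ cols) := by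
  intro rows
  induction rows with
  | nil =>
    intro D P hG hR a b hab
    exact hG a b ⟨by simpa using hab.1, hab.2⟩
  | cons i rest ih =>
    intro D P hG hR
    have hcols : pvColsOK h w di dj i cols (fun p => P p.1 ∧ p.2 ∈ cols) := by
      apply hchain
      intro hdi0 c hc hin
      have hin' := hin
      simp only [pvInR2, Bool.and_eq_true, decide_eq_true_eq] at hin'
      obtain ⟨⟨⟨q1, q2⟩, q3⟩, q4⟩ := hin'
      exact ⟨hR.1 hdi0 q1 q2, hmem _ q3 q4⟩
    have h1 := pvInner seats hd i cols D _ hG hcols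
    have h2 := ih (cols.foldl (pvInnerF seats h w di dj i) D) (fun a => P a ∨ a = i)
      (fun a b hab => h1 a b (by
        rcases hab with ⟨hP | ha, hb⟩
        · exact Or.inl ⟨hP, hb⟩
        · exact Or.inr ⟨ha, hb⟩)) hR.2
    intro a b hab
    apply h2 a b
    simp only at hab ⊢
    rcases hab with ⟨hP | hmemr, hbc⟩
    · exact ⟨Or.inl (Or.inl hP), hbc⟩
    · rcases List.mem_cons.mp hmemr with rfl | hmemr
      · exact ⟨Or.inl (Or.inr rfl), hbc⟩
      · exact ⟨Or.inr hmemr, hbc⟩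

theorem pvBuildVis_get (seats : List (List String)) {h w di dj : Int} (hd : pvDirOK di dj)
    {i j : Int} (hi : 0 ≤ i) (hi' : i < h) (hj : 0 ≤ j) (hj' : j < w) :
    (pvBuildVis seats h w di dj).get? (i, j) = some (pvSEEN seats h w di dj (i + di) (j + dj)) := by
  have hdK := hd
  obtain ⟨h1, h2, h3⟩ := hd
  have key : pvGood seats h w di dj (pvBuildVis seats h w di dj)
      (fun p => ((fun _ : Int => False) p.1 ∨
          p.1 ∈ (if di ≤ 0 then PySem.List.pyRange 0 h else PySem.List.pyRange (h - 1) (-1) (-1))) ∧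
        p.2 ∈ (if dj ≤ 0 then PySem.List.pyRange 0 w else PySem.List.pyRange (w - 1) (-1) (-1))) := by
    apply pvOuter seats hdK _ ?_ ?_ _ PySem.Dict.empty (fun _ => False) ?_ ?_
    · -- hmem
      intro b hb hb'
      split_ifs with hdj
      · exact PySem.List.mem_pyRange_one.mpr ⟨hb, hb'⟩
      · exact (pvMem_range_desc w.toNat (w - 1) b (by omega)).mpr ⟨hb, by omega⟩
    · -- hchain
      intro i' S hS
      split_ifs with hdj
      · rcases h2 with rfl | rfl | rfl
        · rcases h1 with rfl | rfl | rfl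
          · exact pvColsOK_of_forall _ _ (hS (by norm_num))
          · exact pvColsOK_asc w.toNat 0 S (by omega) (fun b hb hb' => absurd hb' (by omega))
          · exact pvColsOK_of_forall _ _ (hS (by norm_num))
        · rcases h1 with rfl | rfl | rfl
          · exact pvColsOK_of_forall _ _ (hS (by norm_num))
          · exact absurd ⟨rfl, rfl⟩ h3
          · exact pvColsOK_of_forall _ _ (hS (by norm_num))
        · exact absurd hdj (by norm_num)
      · have hdj1 : dj = 1 := by rcases h2 with rfl | rfl | rfl <;> omega
        subst hdj1
        rcases h1 with rfl | rfl | rfl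
        · exact pvColsOK_of_forall _ _ (hS (by norm_num))
        · exact pvColsOK_desc w.toNat (w - 1) S (by omega) (fun b hb hb' => absurd hb (by omega))
        · exact pvColsOK_of_forall _ _ (hS (by norm_num))
    · -- initial Good
      intro a b hab
      exact hab.1.elim
    · -- rowsOK
      split_ifs with hdi
      · have : di = -1 ∨ di = 0 := by rcases h1 with rfl | rfl | rfl <;> omega
        exact pvRowsOK_asc this h.toNat 0 _ (by omega) (fun b hb hb' => absurd hb' (by omega))
      · have hdi1 : di = 1 := by rcases h1 with rfl | rfl | rfl <;> omega
        subst hdi1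
        exact pvRowsOK_desc h.toNat (h - 1) _ (by omega) (fun b hb hb' => absurd hb (by omega))
  apply key i j
  refine ⟨Or.inr ?_, ?_⟩
  · split_ifs with hdi
    · exact PySem.List.mem_pyRange_one.mpr ⟨hi, hi'⟩
    · exact (pvMem_range_desc h.toNat (h - 1) i (by omega)).mpr ⟨hi, by omega⟩
  · split_ifs with hdj
    · exact PySem.List.mem_pyRange_one.mpr ⟨hj, hj'⟩
    · exact (pvMem_range_desc w.toNat (w - 1) j (by omega)).mpr ⟨hj, by omega⟩

-- ===== A's count equals the sum of the 8 pvSEEN indicators =====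

def pvCount (seats : List (List String)) (h w i j : Int) : Int :=
  (pvDirs.map (fun d => if pvSEEN seats h w d.1 d.2 (i + d.1) (j + d.2) then (1 : Int) else 0)).sum

theorem pvVisLoop_eq (seats : List (List String)) (h w di dj : Int) :
    ∀ (f : Nat) (ni nj res : Int),
      pvVisLoop seats h w di dj f ni nj res =
        res + (if pvSeen seats h w di dj f ni nj then 1 else 0) := by
  intro f
  induction f with
  | zero => intro ni nj res; simp [pvVisLoop, pvSeen]
  | succ f ih =>
    intro ni nj res
    simp only [pvVisLoop, pvSeen, pvInR_eq]
    by_cases hR : pvInR2 h w ni nj = true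
    · simp only [hR, if_true]
      by_cases hc : pvCell seats ni nj = "L"
      · simp [hc]
      · by_cases hc2 : pvCell seats ni nj = "#"
        · simp [hc2]
        · simp only [hc, hc2, if_false]
          exact ih _ _ _
    · simp [hR]

theorem pvSB_le {h w di dj i j : Int} (hd : pvDirOK di dj)
    (hi : 0 ≤ i) (hi' : i < h) (hj : 0 ≤ j) (hj' : j < w) :
    pvSB h w di dj (i + di) (j + dj) ≤ h.toNat + w.toNat + 2 := by
  obtain ⟨h1, h2, h3⟩ := hd
  simp only [pvSB]
  rcases h1 with rfl | rfl | rfl <;> rcases h2 with rfl | rfl | rfl <;> norm_num <;> omega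

theorem pvCountVisible_eq (seats : List (List String)) {i j : Int}
    (hi : 0 ≤ i) (hi' : i < (seats.length : Int)) (hj : 0 ≤ j)
    (hj' : j < ((seats.headD []).length : Int)) :
    pvCountVisible seats i j =
      pvCount seats (seats.length : Int) ((seats.headD []).length : Int) i j := by
  unfold pvCountVisible pvCount
  have hcongr : ∀ (acc : Int) (d : Int × Int), d ∈ pvDirs →
      pvVisLoop seats (seats.length : Int) ((seats.headD []).length : Int) d.1 d.2
        (seats.length + (seats.headD []).length + 2) (i + d.1) (j + d.2) acc =
      acc + (if pvSEEN seats (seats.length : Int) ((seats.headD []).length : Int) d.1 d.2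
          (i + d.1) (j + d.2) then (1 : Int) else 0) := by
    intro acc d hdm
    rw [pvVisLoop_eq]
    congr 1
    rw [pvSeen_eq_SEEN seats (pvDirOK_of_mem hdm)]
    have := pvSB_le (h := (seats.length : Int)) (w := ((seats.headD []).length : Int))
      (pvDirOK_of_mem hdm) hi hi' hj hj'
    simpa using this
  rw [PySem.List.foldl_congr_mem _ _ _ _ hcongr, PySem.List.foldl_add]
  simp

theorem pvCountB_eq (seats : List (List String)) {i j : Int}
    (hi : 0 ≤ i) (hi' : i < (seats.length : Int)) (hj : 0 ≤ j)
    (hj' : j < ((seats.headD []).length : Int)) :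
    pvCountB (pvDirs.foldl (fun ts d => ts ++ [pvBuildVis seats (seats.length : Int) ((seats.headD []).length : Int) d.1 d.2]) []) i j =
      pvCount seats (seats.length : Int) ((seats.headD []).length : Int) i j := by
  unfold pvCountB pvCount
  rw [PySem.List.foldl_append_singleton_eq_map, List.nil_append, List.map_map]
  apply congrArg List.sum
  apply List.map_congr_left
  intro d hdm
  simp only [Function.comp_apply]
  rw [pvBuildVis_get seats (pvDirOK_of_mem hdm) hi hi' hj hj']
  rfl


-- ===== assembling the grids =====

-- the common per-cell row update both programs perform at column j of row i
def pvRowStep (seats : List (List String)) (h w i : Int) (row : List String) (j : Int) :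
    List String :=
  if pvCell seats i j = "." then row
  else if pvCell seats i j = "L" ∧ pvCount seats h w i j = 0 then row.set j.toNat "#"
  else if pvCell seats i j = "#" ∧ pvCount seats h w i j ≥ 5 then row.set j.toNat "L"
  else row

theorem pvRowStep_cases (seats : List (List String)) (h w i row j) :
    pvRowStep seats h w i row j = row ∨
      ∃ v, pvRowStep seats h w i row j = row.set j.toNat v := by
  unfold pvRowStep
  split_ifs
  · exact Or.inl rfl
  · exact Or.inr ⟨_, rfl⟩
  · exact Or.inr ⟨_, rfl⟩
  · exact Or.inl rfl

theorem pvGet_set_ne (row : List String) (m : Nat) (v : String) (j : Int) (hj : 0 ≤ j)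
    (hne : j.toNat ≠ m) :
    PySem.List.pyGet? (row.set m v) j = PySem.List.pyGet? row j := by
  have hj' : j = ((j.toNat : Nat) : Int) := by omega
  rw [hj', PySem.List.pyGet?_natCast, PySem.List.pyGet?_natCast,
    List.getElem?_set_ne (by omega)]

-- A's inner loop only rewrites row i, and does so by pvRowStep
theorem pvAInner (seats : List (List String)) (i : Int) (hi : 0 ≤ i)
    (hi' : i < (seats.length : Int)) :
    ∀ (js : List Int) (g : List (List String)),
      g.length = seats.length →
      (∀ j ∈ js, 0 ≤ j ∧ j < ((seats.headD []).length : Int)) →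
      js.foldl (fun new j =>
          if pvCell seats i j = "." then new
          else
            let neighbours := pvCountVisible seats i j
            let new' := if pvCell seats i j = "L" ∧ neighbours = 0 then pvSetCell new i j "#" else new
            if pvCell seats i j = "#" ∧ neighbours ≥ 5 then pvSetCell new' i j "L" else new') g
        = g.set i.toNat
            (js.foldl (pvRowStep seats (seats.length : Int) ((seats.headD []).length : Int) i)
              (g.getD i.toNat [])) := by
  intro js
  induction js with
  | nil =>
    intro g hlen _
    have hlt : i.toNat < g.length := by omega
    simp only [List.foldl_nil]
    rw [List.getD_eq_getElem?_getD, List.getElem?_eq_getElem hlt]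
    exact (List.set_getElem_self hlt).symm
  | cons j js ih =>
    intro g hlen hjs
    have hj := hjs j List.mem_cons_self
    have hlt : i.toNat < g.length := by omega
    have hbody : (if pvCell seats i j = "." then g
          else
            let neighbours := pvCountVisible seats i j
            let new' := if pvCell seats i j = "L" ∧ neighbours = 0 then pvSetCell g i j "#" else g
            if pvCell seats i j = "#" ∧ neighbours ≥ 5 then pvSetCell new' i j "L" else new')
        = g.set i.toNat
            (pvRowStep seats (seats.length : Int) ((seats.headD []).length : Int) i
              (g.getD i.toNat []) j) := by
      show (if pvCell seats i j = "." then g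
          else
            if pvCell seats i j = "#" ∧ pvCountVisible seats i j ≥ 5 then
              pvSetCell (if pvCell seats i j = "L" ∧ pvCountVisible seats i j = 0 then
                  pvSetCell g i j "#" else g) i j "L"
            else (if pvCell seats i j = "L" ∧ pvCountVisible seats i j = 0 then
                pvSetCell g i j "#" else g)) = _
      rw [pvCountVisible_eq seats hi hi' hj.1 hj.2]
      unfold pvRowStep pvSetCell
      by_cases hdot : pvCell seats i j = "."
      · rw [if_pos hdot, if_pos hdot]
        rw [List.getD_eq_getElem?_getD, List.getElem?_eq_getElem hlt]
        exact (List.set_getElem_self hlt).symm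
      · rw [if_neg hdot, if_neg hdot]
        by_cases hL : pvCell seats i j = "L" ∧
            pvCount seats (seats.length : Int) ((seats.headD []).length : Int) i j = 0
        · have hT : ¬ (pvCell seats i j = "#" ∧
              pvCount seats (seats.length : Int) ((seats.headD []).length : Int) i j ≥ 5) := by
            intro hT; rw [hL.1] at hT; exact absurd hT.1 (by decide)
          rw [if_neg hT, if_pos hL, if_pos hL]
        · rw [if_neg hL, if_neg hL]
          by_cases hT : pvCell seats i j = "#" ∧
              pvCount seats (seats.length : Int) ((seats.headD []).length : Int) i j ≥ 5
          · rw [if_pos hT, if_pos hT]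
          · rw [if_neg hT, if_neg hT]
            rw [List.getD_eq_getElem?_getD, List.getElem?_eq_getElem hlt]
            exact (List.set_getElem_self hlt).symm
    rw [List.foldl_cons, List.foldl_cons, hbody,
      ih _ (by simpa using hlen) (fun x hx => hjs x (List.mem_cons_of_mem j hx)),
      List.set_set]
    congr 1
    rw [List.getD_eq_getElem?_getD, List.getElem?_set_self (by omega)]
    rw [List.getD_eq_getElem?_getD, List.getElem?_eq_getElem hlt]
    rfl


-- B's inner loop reads its cells from the evolving row, but at each j the cell is still
-- the original one, so it is pvRowStep as well
theorem pvBInner (seats : List (List String)) (i : Int) (hi : 0 ≤ i)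
    (hi' : i < (seats.length : Int)) :
    ∀ (n : Nat) (a : Int) (row : List String), 0 ≤ a →
      (((seats.headD []).length : Int) - a).toNat ≤ n →
      (∀ j' : Int, a ≤ j' →
        PySem.List.pyGet? row j' = PySem.List.pyGet? ((PySem.List.pyGet? seats i).getD []) j') →
      (PySem.List.pyRange a ((seats.headD []).length : Int)).foldl
        (fun row j =>
          let c := (PySem.List.pyGet? row j).getD ""
          if c = "." then row
          else
            let n := pvCountB (pvDirs.foldl (fun ts d =>
              ts ++ [pvBuildVis seats (seats.length : Int) ((seats.headD []).length : Int) d.1 d.2]) []) i j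
            if c = "L" ∧ n = 0 then row.set j.toNat "#"
            else if c = "#" ∧ n ≥ 5 then row.set j.toNat "L"
            else row) row
      = (PySem.List.pyRange a ((seats.headD []).length : Int)).foldl
          (pvRowStep seats (seats.length : Int) ((seats.headD []).length : Int) i) row := by
  intro n
  induction n with
  | zero =>
    intro a row ha hn hrow
    rw [pvRange_one_nil (by omega)]
    rfl
  | succ n ih =>
    intro a row ha hn hrow
    by_cases haw : a < ((seats.headD []).length : Int)
    · rw [PySem.List.pyRange_one_cons haw, List.foldl_cons, List.foldl_cons]
      have hc : (PySem.List.pyGet? row a).getD "" = pvCell seats i a := by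
        unfold pvCell
        rw [hrow a le_rfl]
      have hstep : (let c := (PySem.List.pyGet? row a).getD ""
          if c = "." then row
          else
            let n := pvCountB (pvDirs.foldl (fun ts d =>
              ts ++ [pvBuildVis seats (seats.length : Int) ((seats.headD []).length : Int) d.1 d.2]) []) i a
            if c = "L" ∧ n = 0 then row.set a.toNat "#"
            else if c = "#" ∧ n ≥ 5 then row.set a.toNat "L"
            else row)
          = pvRowStep seats (seats.length : Int) ((seats.headD []).length : Int) i row a := by
        show (if (PySem.List.pyGet? row a).getD "" = "." then row
          else
            if (PySem.List.pyGet? row a).getD "" = "L" ∧ pvCountB (pvDirs.foldl (fun ts d =>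
                ts ++ [pvBuildVis seats (seats.length : Int) ((seats.headD []).length : Int) d.1 d.2]) []) i a = 0
              then row.set a.toNat "#"
            else if (PySem.List.pyGet? row a).getD "" = "#" ∧ pvCountB (pvDirs.foldl (fun ts d =>
                ts ++ [pvBuildVis seats (seats.length : Int) ((seats.headD []).length : Int) d.1 d.2]) []) i a ≥ 5
              then row.set a.toNat "L"
            else row) = _
        rw [hc, pvCountB_eq seats hi hi' ha haw]
        rfl
      rw [hstep]
      apply ih (a + 1) _ (by omega) (by omega)
      intro j' hj'
      rcases pvRowStep_cases seats (seats.length : Int) ((seats.headD []).length : Int) i row a with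
        heq | ⟨v, heq⟩
      · rw [heq]; exact hrow j' (by omega)
      · rw [heq, pvGet_set_ne row a.toNat v j' (by omega) (by omega)]
        exact hrow j' (by omega)
    · rw [pvRange_one_nil (by omega)]
      rfl


-- simultaneous induction over the remaining rows: A's grid is B's accumulator followed
-- by the untouched rows
theorem pvMain (seats : List (List String)) :
    ∀ (n : Nat) (a : Int) (acc : List (List String)), 0 ≤ a →
      ((seats.length : Int) - a).toNat ≤ n → acc.length = a.toNat →
      (PySem.List.pyRange a (seats.length : Int)).foldl
        (fun new i =>
          (PySem.List.pyRange 0 ((seats.headD []).length : Int)).foldl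
            (fun new j =>
              if pvCell seats i j = "." then new
              else
                let neighbours := pvCountVisible seats i j
                let new' := if pvCell seats i j = "L" ∧ neighbours = 0 then pvSetCell new i j "#" else new
                if pvCell seats i j = "#" ∧ neighbours ≥ 5 then pvSetCell new' i j "L" else new')
            new)
        (acc ++ seats.drop a.toNat)
      = (PySem.List.pyRange a (seats.length : Int)).foldl
          (fun new i =>
            let row := (PySem.List.pyGet? seats i).getD []
            let row' := (PySem.List.pyRange 0 ((seats.headD []).length : Int)).foldl
              (fun row j =>
                let c := (PySem.List.pyGet? row j).getD ""
                if c = "." then row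
                else
                  let n := pvCountB (pvDirs.foldl (fun ts d =>
                    ts ++ [pvBuildVis seats (seats.length : Int) ((seats.headD []).length : Int) d.1 d.2]) []) i j
                  if c = "L" ∧ n = 0 then row.set j.toNat "#"
                  else if c = "#" ∧ n ≥ 5 then row.set j.toNat "L"
                  else row)
              row
            new ++ [row'])
          acc := by
  intro n
  induction n with
  | zero =>
    intro a acc ha hn hlen
    rw [pvRange_one_nil (a := a) (b := (seats.length : Int)) (by omega)]
    simp only [List.foldl_nil]
    rw [List.drop_eq_nil_of_le (by omega), List.append_nil]
  | succ n ih =>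
    intro a acc ha hn hlen
    by_cases hah : a < (seats.length : Int)
    · rw [PySem.List.pyRange_one_cons hah, List.foldl_cons, List.foldl_cons]
      have hlt : a.toNat < seats.length := by omega
      have hAlen : (acc ++ seats.drop a.toNat).length = seats.length := by
        simp [hlen]; omega
      rw [pvAInner seats a ha hah _ _ hAlen (fun j hj => by
        have := PySem.List.mem_pyRange_one.mp hj
        exact ⟨this.1, this.2⟩)]
      have hgetD : (acc ++ seats.drop a.toNat).getD a.toNat [] = seats[a.toNat] := by
        rw [List.getD_eq_getElem?_getD, List.getElem?_append_right (by omega),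
          show a.toNat - acc.length = 0 from by omega, List.getElem?_drop,
          show a.toNat + 0 = a.toNat from rfl, List.getElem?_eq_getElem hlt]
        rfl
      have hrowB : (PySem.List.pyGet? seats a).getD [] = seats[a.toNat] := by
        have hsome : PySem.List.pyGet? seats a = some seats[a.toNat] := by
          conv_lhs => rw [show a = ((a.toNat : Nat) : Int) from by omega]
          rw [PySem.List.pyGet?_natCast]
          exact List.getElem?_eq_getElem hlt
        rw [hsome]
        rfl
      have hB : (let row := (PySem.List.pyGet? seats a).getD []
            let row' := (PySem.List.pyRange 0 ((seats.headD []).length : Int)).foldl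
              (fun row j =>
                let c := (PySem.List.pyGet? row j).getD ""
                if c = "." then row
                else
                  let n := pvCountB (pvDirs.foldl (fun ts d =>
                    ts ++ [pvBuildVis seats (seats.length : Int) ((seats.headD []).length : Int) d.1 d.2]) []) a j
                  if c = "L" ∧ n = 0 then row.set j.toNat "#"
                  else if c = "#" ∧ n ≥ 5 then row.set j.toNat "L"
                  else row)
              row
            acc ++ [row'])
          = acc ++ [(PySem.List.pyRange 0 ((seats.headD []).length : Int)).foldl
              (pvRowStep seats (seats.length : Int) ((seats.headD []).length : Int) a)
              seats[a.toNat]] := by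
        show acc ++ [(PySem.List.pyRange 0 ((seats.headD []).length : Int)).foldl
            _ ((PySem.List.pyGet? seats a).getD [])] = _
        rw [hrowB]
        rw [pvBInner seats a ha hah (seats.headD []).length 0 seats[a.toNat]
          le_rfl (by omega) (fun j' _ => by rw [hrowB])]
      rw [hB, hgetD]
      have hstate : (acc ++ seats.drop a.toNat).set a.toNat
            ((PySem.List.pyRange 0 ((seats.headD []).length : Int)).foldl
              (pvRowStep seats (seats.length : Int) ((seats.headD []).length : Int) a)
              seats[a.toNat])
          = (acc ++ [(PySem.List.pyRange 0 ((seats.headD []).length : Int)).foldl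
              (pvRowStep seats (seats.length : Int) ((seats.headD []).length : Int) a)
              seats[a.toNat]]) ++ seats.drop (a + 1).toNat := by
        rw [List.drop_eq_getElem_cons hlt, List.set_append, if_neg (by omega),
          show a.toNat - acc.length = 0 from by omega, List.set_cons_zero,
          List.append_cons, show (a + 1).toNat = a.toNat + 1 from by omega]
      rw [hstate]
      exact ih (a + 1) _ (by omega) (by omega) (by simp [hlen]; omega)
    · rw [pvRange_one_nil (a := a) (b := (seats.length : Int)) (by omega)]
      simp only [List.foldl_nil]
      rw [List.drop_eq_nil_of_le (by omega), List.append_nil]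

-- ===== VERDICT (by name: the statement is the Claim_ definition above) =====
theorem next_state_2_spec : Claim_equal_next_state_2 := by
  unfold Claim_equal_next_state_2
  intro seats _ _
  unfold Spec_next_state_2 next_state_2 next_state_2_alt
  by_cases hnil : (seats.length : Int) = 0
  · have hseats : seats = [] := by
      cases seats with
      | nil => rfl
      | cons x xs => exfalso; simp at hnil; omega
    subst hseats
    rfl
  · simp only []
    rw [if_neg hnil]
    have hmain := pvMain seats seats.length 0 [] le_rfl (by omega) rfl
    simpa using hmain
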